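-- pv_equiv track=rewrite | github.com/LoponteHF/GlycoGenius_GUI | glycogenius_GUI/GG_Draw.py | replace_s_and_g_with_chars
-- ===== SOURCE A (Python) =====
-- def replace_s_and_g_with_chars(str_list, s_char_string, g_char_string):
--     '''Replaces 'S' with characters from s_char_string and 'G' with characters from g_char_string in the list of strings.'''
--
--     # Create two iterators: one for replacing 'S' and one for replacing 'G'
--     s_char_iter = iter(s_char_string)
--     g_char_iter = iter(g_char_string)
--
--     # Process each string in the list
--     result = []
--     for s in str_list:
--         new_string = ''
--         for char in s:
--             if char == 'S':
--                 # Replace 'S' with the next character from s_char_iter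
--                 new_string += next(s_char_iter)
--             elif char == 'G':
--                 # Replace 'G' with the next character from g_char_iter
--                 new_string += next(g_char_iter)
--             else:
--                 new_string += char
--         result.append(new_string)
--
--     return result
-- ===== SOURCE B (Python) =====
-- def replace_s_and_g_with_chars(str_list, s_char_string, g_char_string):
--     '''Flatten-replace-split: do one global replacement pass over the
--     concatenation of all strings, then cut the result back into pieces.'''
--     lens = [len(s) for s in str_list]
--     flat = []
--     s_i = 0
--     g_i = 0
--     for c in ''.join(str_list):
--         if c == 'S':
--             flat.append(s_char_string[s_i])
--             s_i += 1
--         elif c == 'G':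
--             flat.append(g_char_string[g_i])
--             g_i += 1
--         else:
--             flat.append(c)
--     out = []
--     pos = 0
--     for L in lens:
--         out.append(''.join(flat[pos:pos+L]))
--         pos += L
--     return out
-- ===== Notes on version B (the rewrite author's own statement) =====
-- stated objective: alternative
-- what changed: B flattens the whole list into one string, does a single global replacement pass drawing from the two replacement pools via running indices, and then splits the flat result back into pieces by the recorded lengths, instead of A's nested per-string/per-character loop threading two shared iterators.
import Mathlib
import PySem

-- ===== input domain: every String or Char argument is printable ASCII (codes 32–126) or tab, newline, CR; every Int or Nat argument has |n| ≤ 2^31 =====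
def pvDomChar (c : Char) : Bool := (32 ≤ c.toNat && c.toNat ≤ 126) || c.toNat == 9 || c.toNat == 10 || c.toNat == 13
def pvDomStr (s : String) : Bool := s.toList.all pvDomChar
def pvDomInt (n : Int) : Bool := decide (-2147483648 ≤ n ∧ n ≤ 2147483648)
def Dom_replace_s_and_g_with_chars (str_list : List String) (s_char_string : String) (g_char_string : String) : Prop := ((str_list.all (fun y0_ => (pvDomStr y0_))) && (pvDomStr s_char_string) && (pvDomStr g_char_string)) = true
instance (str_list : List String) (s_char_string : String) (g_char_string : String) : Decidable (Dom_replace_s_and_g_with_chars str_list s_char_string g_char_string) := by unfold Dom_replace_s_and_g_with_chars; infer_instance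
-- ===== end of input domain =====

-- B replaces A's nested per-string loop threading two iterators by a single global
-- replacement pass over the flattened list followed by a split by recorded lengths
-- (objective: alternative; equivalence proved on Pre_, where neither program raises).

-- ===== PORT A =====
-- inner per-character loop of A: consumes the two iterator tails; the [] cases are
-- where Python's next(...) raises StopIteration (excluded by Pre_)
def pvGoStrA : List Char → List Char → List Char → List Char → List Char × List Char × List Char
  | [], sit, git, acc => (acc, sit, git)
  | c :: cs, sit, git, acc =>
    if c = 'S' then
      match sit with
      | sc :: s' => pvGoStrA cs s' git (acc ++ [sc])
      | [] => (acc, [], git)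
    else if c = 'G' then
      match git with
      | gc :: g' => pvGoStrA cs sit g' (acc ++ [gc])
      | [] => (acc, sit, [])
    else pvGoStrA cs sit git (acc ++ [c])

-- outer loop of A over str_list, threading the iterator states and result list
def pvOuterA : List String → List Char → List Char → List String → List String
  | [], _, _, res => res
  | s :: rest, sit, git, res =>
    match pvGoStrA s.toList sit git [] with
    | (nc, sit', git') => pvOuterA rest sit' git' (res ++ [String.mk nc])

def replace_s_and_g_with_chars (str_list : List String) (s_char_string : String) (g_char_string : String) : List String :=
  pvOuterA str_list s_char_string.toList g_char_string.toList []

-- ===== PORT B =====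
-- B's single global pass, drawing replacements from the two pools via running
-- indices; an out-of-range index is Python's IndexError (excluded by Pre_) and
-- here leaves the char unchanged
def pvRepFlatB : List Char → List Char → List Char → Nat → Nat → List Char
  | [], _, _, _, _ => []
  | c :: cs, sl, gl, si, gi =>
    if c = 'S' then sl.getD si c :: pvRepFlatB cs sl gl (si+1) gi
    else if c = 'G' then gl.getD gi c :: pvRepFlatB cs sl gl si (gi+1)
    else c :: pvRepFlatB cs sl gl si gi

-- B's split-back loop over the recorded lengths; flat[pos:pos+L] with 0 ≤ pos ≤ pos+L
-- is exactly (flat.drop pos).take L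
def pvSplitB : List Nat → List Char → Nat → List String → List String
  | [], _, _, out => out
  | L :: ls, flat, pos, out => pvSplitB ls flat (pos+L) (out ++ [String.mk ((flat.drop pos).take L)])

def replace_s_and_g_with_chars_alt (str_list : List String) (s_char_string : String) (g_char_string : String) : List String :=
  let lens := str_list.map (fun s => s.toList.length)
  let flat := pvRepFlatB ((str_list.map String.toList).flatten) s_char_string.toList g_char_string.toList 0 0
  pvSplitB lens flat 0 []

-- ===== PRECONDITION & SPEC =====
-- Pre_ excludes exactly the inputs on which A raises StopIteration: more 'S' (resp. 'G')
-- characters in str_list than s_char_string (resp. g_char_string) supplies.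
def Pre_replace_s_and_g_with_chars (str_list : List String) (s_char_string : String) (g_char_string : String) : Prop :=
  ((str_list.map String.toList).flatten.count 'S') ≤ s_char_string.toList.length ∧
  ((str_list.map String.toList).flatten.count 'G') ≤ g_char_string.toList.length
instance (str_list : List String) (s_char_string : String) (g_char_string : String) : Decidable (Pre_replace_s_and_g_with_chars str_list s_char_string g_char_string) := by unfold Pre_replace_s_and_g_with_chars; infer_instance

def pvWitness_replace_s_and_g_with_chars : List String × String × String := (["aSbG", "SG"], "xy", "uv")

def Spec_replace_s_and_g_with_chars (str_list : List String) (s_char_string : String) (g_char_string : String) (out : List String) : Prop := out = replace_s_and_g_with_chars_alt str_list s_char_string g_char_string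
instance (str_list : List String) (s_char_string : String) (g_char_string : String) (out : List String) : Decidable (Spec_replace_s_and_g_with_chars str_list s_char_string g_char_string out) := by unfold Spec_replace_s_and_g_with_chars; infer_instance

-- ===== CLAIM (what is proved, stated in full; the proofs are below) =====
def Claim_equal_replace_s_and_g_with_chars : Prop := ∀ (str_list : List String) (s_char_string : String) (g_char_string : String), Dom_replace_s_and_g_with_chars str_list s_char_string g_char_string → Pre_replace_s_and_g_with_chars str_list s_char_string g_char_string → Spec_replace_s_and_g_with_chars str_list s_char_string g_char_string (replace_s_and_g_with_chars str_list s_char_string g_char_string)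

-- ===== LEMMAS AND PROOFS =====

-- proof-side reformulations of B's pass: consuming-list version of the replacement
-- pass and a split that consumes the flat list
def pvRepFlatC : List Char → List Char → List Char → List Char
  | [], _, _ => []
  | c :: cs, sit, git =>
    if c = 'S' then
      match sit with
      | sc :: s' => sc :: pvRepFlatC cs s' git
      | [] => c :: pvRepFlatC cs [] git
    else if c = 'G' then
      match git with
      | gc :: g' => gc :: pvRepFlatC cs sit g'
      | [] => c :: pvRepFlatC cs sit []
    else c :: pvRepFlatC cs sit git

def pvSplitC : List Nat → List Char → List String → List String
  | [], _, out => out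
  | L :: ls, flat, out => pvSplitC ls (flat.drop L) (out ++ [String.mk (flat.take L)])

set_option maxRecDepth 4096 in
theorem pvRepFlatB_eq_C (cs : List Char) : ∀ sl gl si gi,
    cs.count 'S' + si ≤ sl.length → cs.count 'G' + gi ≤ gl.length →
    pvRepFlatB cs sl gl si gi = pvRepFlatC cs (sl.drop si) (gl.drop gi) := by
  induction cs with
  | nil => intro sl gl si gi _ _; simp [pvRepFlatB, pvRepFlatC]
  | cons c cs ih =>
    intro sl gl si gi hs hg
    by_cases hS : c = 'S'
    · subst hS
      have hsi : si < sl.length := by simp [List.count_cons] at hs; omega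
      have hs' : cs.count 'S' + (si+1) ≤ sl.length := by simp [List.count_cons] at hs; omega
      have hg' : cs.count 'G' + gi ≤ gl.length := by simp [List.count_cons] at hg; omega
      have hds : sl.drop si = sl[si] :: sl.drop (si+1) := List.drop_eq_getElem_cons hsi
      simp only [pvRepFlatB, pvRepFlatC, hds, reduceIte]
      rw [List.getD_eq_getElem sl 'S' hsi, ih sl gl (si+1) gi hs' hg']
    · by_cases hG : c = 'G'
      · subst hG
        have hgi : gi < gl.length := by simp [List.count_cons] at hg; omega
        have hs' : cs.count 'S' + si ≤ sl.length := by simp [List.count_cons] at hs; omega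
        have hg' : cs.count 'G' + (gi+1) ≤ gl.length := by simp [List.count_cons] at hg; omega
        have hdg : gl.drop gi = gl[gi] :: gl.drop (gi+1) := List.drop_eq_getElem_cons hgi
        simp only [pvRepFlatB, pvRepFlatC, hdg, reduceIte]
        rw [List.getD_eq_getElem gl 'G' hgi, ih sl gl si (gi+1) hs' hg']
        simp only [if_neg hS]
      · have hs' : cs.count 'S' + si ≤ sl.length := by simp [List.count_cons, hS] at hs; omega
        have hg' : cs.count 'G' + gi ≤ gl.length := by simp [List.count_cons, hG] at hg; omega
        simp only [pvRepFlatB, if_neg hS, if_neg hG]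
        rw [ih sl gl si gi hs' hg']
        cases hdrop : sl.drop si <;> cases hdrop2 : gl.drop gi <;>
          simp [pvRepFlatC, hS, hG]

theorem pvSplitB_eq_C (ls : List Nat) : ∀ flat pos out,
    pvSplitB ls flat pos out = pvSplitC ls (flat.drop pos) out := by
  induction ls with
  | nil => intro flat pos out; simp [pvSplitB, pvSplitC]
  | cons L ls ih =>
    intro flat pos out
    simp only [pvSplitB, pvSplitC, ih, List.drop_drop]

theorem pvRepFlatC_length (cs : List Char) : ∀ sit git, (pvRepFlatC cs sit git).length = cs.length := by
  induction cs with
  | nil => intro sit git; simp [pvRepFlatC]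
  | cons c cs ih =>
    intro sit git
    simp only [pvRepFlatC]
    split_ifs <;> cases sit <;> cases git <;> simp [ih]

theorem pvRepFlatC_append (cs : List Char) : ∀ ds sit git,
    cs.count 'S' ≤ sit.length → cs.count 'G' ≤ git.length →
    pvRepFlatC (cs ++ ds) sit git =
      pvRepFlatC cs sit git ++ pvRepFlatC ds (sit.drop (cs.count 'S')) (git.drop (cs.count 'G')) := by
  induction cs with
  | nil => intro ds sit git _ _; simp [pvRepFlatC]
  | cons c cs ih =>
    intro ds sit git hs hg
    by_cases hS : c = 'S'
    · subst hS
      cases sit with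
      | nil => simp [List.count_cons] at hs
      | cons sc s' =>
        have hs' : cs.count 'S' ≤ s'.length := by
          simp [List.count_cons] at hs; omega
        have hg' : cs.count 'G' ≤ git.length := by
          have : List.count 'G' (('S':Char) :: cs) = cs.count 'G' := by
            simp [List.count_cons]
          omega
        simp only [List.cons_append, pvRepFlatC, if_pos rfl]
        rw [ih ds s' git hs' hg']
        simp [List.count_cons]
    · by_cases hG : c = 'G'
      · subst hG
        cases git with
        | nil => simp [List.count_cons] at hg
        | cons gc g' =>
          have hg' : cs.count 'G' ≤ g'.length := by
            simp [List.count_cons] at hg; omega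
          have hs' : cs.count 'S' ≤ sit.length := by
            have : List.count 'S' (('G':Char) :: cs) = cs.count 'S' := by
              simp [List.count_cons]
            omega
          simp only [List.cons_append, pvRepFlatC, if_neg (by decide : ¬ ('G':Char) = 'S'), if_pos rfl]
          rw [ih ds sit g' hs' hg']
          simp [List.count_cons]
      · have hs' : cs.count 'S' ≤ sit.length := by
          simp [List.count_cons, hS] at hs; omega
        have hg' : cs.count 'G' ≤ git.length := by
          simp [List.count_cons, hG] at hg; omega
        simp only [List.cons_append, pvRepFlatC, if_neg hS, if_neg hG]
        rw [ih ds sit git hs' hg']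
        simp [List.count_cons, hS, hG]

theorem pvGoStrA_eq (cs : List Char) : ∀ sit git acc,
    cs.count 'S' ≤ sit.length → cs.count 'G' ≤ git.length →
    pvGoStrA cs sit git acc =
      (acc ++ pvRepFlatC cs sit git, sit.drop (cs.count 'S'), git.drop (cs.count 'G')) := by
  induction cs with
  | nil => intro sit git acc _ _; simp [pvGoStrA, pvRepFlatC]
  | cons c cs ih =>
    intro sit git acc hs hg
    by_cases hS : c = 'S'
    · subst hS
      cases sit with
      | nil => simp [List.count_cons] at hs
      | cons sc s' =>
        have hs' : cs.count 'S' ≤ s'.length := by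
          simp [List.count_cons] at hs; omega
        have hg' : cs.count 'G' ≤ git.length := by
          have : List.count 'G' (('S':Char) :: cs) = cs.count 'G' := by
            simp [List.count_cons]
          omega
        simp only [pvGoStrA, if_pos rfl, pvRepFlatC]
        rw [ih s' git (acc ++ [sc]) hs' hg']
        simp [List.count_cons]
    · by_cases hG : c = 'G'
      · subst hG
        cases git with
        | nil => simp [List.count_cons] at hg
        | cons gc g' =>
          have hg' : cs.count 'G' ≤ g'.length := by
            simp [List.count_cons] at hg; omega
          have hs' : cs.count 'S' ≤ sit.length := by
            have : List.count 'S' (('G':Char) :: cs) = cs.count 'S' := by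
              simp [List.count_cons]
            omega
          simp only [pvGoStrA, if_neg (by decide : ¬ ('G':Char) = 'S'), if_pos rfl, pvRepFlatC]
          rw [ih sit g' (acc ++ [gc]) hs' hg']
          simp [List.count_cons]
      · have hs' : cs.count 'S' ≤ sit.length := by
          simp [List.count_cons, hS] at hs; omega
        have hg' : cs.count 'G' ≤ git.length := by
          simp [List.count_cons, hG] at hg; omega
        simp only [pvGoStrA, if_neg hS, if_neg hG, pvRepFlatC]
        rw [ih sit git (acc ++ [c]) hs' hg']
        simp [List.count_cons, hS, hG]

theorem pvOuterA_eq (L : List String) : ∀ sit git res,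
    ((L.map String.toList).flatten.count 'S') ≤ sit.length →
    ((L.map String.toList).flatten.count 'G') ≤ git.length →
    pvOuterA L sit git res =
      pvSplitC (L.map (fun s => s.toList.length)) (pvRepFlatC ((L.map String.toList).flatten) sit git) res := by
  induction L with
  | nil => intro sit git res _ _; simp [pvOuterA, pvSplitC]
  | cons s rest ih =>
    intro sit git res hs hg
    have hflat : (((s :: rest).map String.toList).flatten) = s.toList ++ (rest.map String.toList).flatten := by
      simp
    rw [hflat] at hs hg
    rw [List.count_append] at hs hg
    have hs1 : s.toList.count 'S' ≤ sit.length := by omega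
    have hg1 : s.toList.count 'G' ≤ git.length := by omega
    have hs2 : ((rest.map String.toList).flatten.count 'S') ≤ (sit.drop (s.toList.count 'S')).length := by
      simp [List.length_drop]; omega
    have hg2 : ((rest.map String.toList).flatten.count 'G') ≤ (git.drop (s.toList.count 'G')).length := by
      simp [List.length_drop]; omega
    simp only [pvOuterA]
    rw [pvGoStrA_eq s.toList sit git [] hs1 hg1]
    simp only [List.nil_append]
    rw [ih _ _ _ hs2 hg2]
    have hmap : (s :: rest).map String.toList = s.toList :: (rest.map String.toList) := rfl
    rw [hmap, List.flatten_cons, pvRepFlatC_append s.toList _ sit git hs1 hg1]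
    simp only [List.map_cons, pvSplitC]
    rw [List.drop_left' (pvRepFlatC_length s.toList sit git),
        List.take_left' (pvRepFlatC_length s.toList sit git)]

-- ===== VERDICT (by name: the statement is the Claim_ definition above) =====
theorem replace_s_and_g_with_chars_spec : Claim_equal_replace_s_and_g_with_chars := by
  intro L s g _ hpre
  unfold Spec_replace_s_and_g_with_chars replace_s_and_g_with_chars replace_s_and_g_with_chars_alt
  rw [pvSplitB_eq_C, List.drop_zero,
     pvRepFlatB_eq_C _ _ _ 0 0 (by simpa using hpre.1) (by simpa using hpre.2),
     List.drop_zero, List.drop_zero]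
  exact pvOuterA_eq L s.toList g.toList [] hpre.1 hpre.2
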